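-- pv_equiv track=rewrite | github.com/eostapenko-mipt/61753381 | lib/utils.py | _mat3d
-- ===== SOURCE A (Python) =====
-- def _mat3d(mat2d, shape):
--     _res3d = []
--     _mat2d = []
--     shape = shape.copy()
--     p = shape.pop(0)
--     for row in mat2d:
--         _mat2d.append(row)
--         if len(_mat2d) == p:
--             _res3d.append(_mat2d)
--             if shape:
--                 p = shape.pop(0)
--             _mat2d = []
--     return _res3d
-- ===== SOURCE B (Python) =====
-- def _mat3d(mat2d, shape):
--     # Chunk whole blocks of rows by slicing instead of a per-row counter.
--     shape = list(shape)
--     p = shape.pop(0)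
--     res = []
--     rest = mat2d
--     while 0 < p <= len(rest):
--         res.append(rest[:p])
--         rest = rest[p:]
--         if shape:
--             p = shape.pop(0)
--     return res
-- ===== Notes on version B (the rewrite author's own statement) =====
-- stated objective: simpler
-- what changed: B slices whole blocks of rows off the front of the matrix in a while-loop (stopping when the next block size is non-positive or exceeds the remaining rows) instead of A's per-row accumulator flushed when a counter hits the size.
import Mathlib
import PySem

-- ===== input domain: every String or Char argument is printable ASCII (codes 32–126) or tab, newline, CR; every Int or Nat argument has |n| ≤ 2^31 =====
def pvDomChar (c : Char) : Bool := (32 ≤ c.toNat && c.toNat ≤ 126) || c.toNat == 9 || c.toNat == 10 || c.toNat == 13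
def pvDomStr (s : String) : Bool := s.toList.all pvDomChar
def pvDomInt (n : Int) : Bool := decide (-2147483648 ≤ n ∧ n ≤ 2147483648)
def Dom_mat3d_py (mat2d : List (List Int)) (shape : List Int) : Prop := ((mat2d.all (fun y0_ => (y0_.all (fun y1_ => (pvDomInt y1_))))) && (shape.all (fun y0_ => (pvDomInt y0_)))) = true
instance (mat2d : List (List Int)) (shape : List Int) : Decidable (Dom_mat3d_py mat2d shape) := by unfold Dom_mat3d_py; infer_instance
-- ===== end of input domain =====

-- B chunks rows by whole-block slicing instead of A's per-row counter; return values agree on every input where A returns (shape nonempty).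

-- ===== PORT A =====
-- one step of A's for-loop; state = (_res3d, _mat2d, remaining shape, p)
def stepA (st : List (List (List Int)) × List (List Int) × List Int × Int) (row : List Int) :
    List (List (List Int)) × List (List Int) × List Int × Int :=
  let cur := st.2.1 ++ [row]
  if (cur.length : Int) = st.2.2.2 then
    match st.2.2.1 with
    | q :: sh' => (st.1 ++ [cur], [], sh', q)
    | [] => (st.1 ++ [cur], [], [], st.2.2.2)
  else (st.1, cur, st.2.2.1, st.2.2.2)

def mat3d_py (mat2d : List (List Int)) (shape : List Int) : List (List (List Int)) :=
  match shape with
  | [] => []  -- Python raises IndexError here (shape.pop(0) on empty list); excluded by Pre_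
  | p :: rest => (mat2d.foldl stepA ([], [], rest, p)).1

-- ===== PORT B =====
-- B's while-loop: rest[:p] / rest[p:] with 0 < p are List.take/List.drop
def altLoop (rest : List (List Int)) (sh : List Int) (p : Int) (res : List (List (List Int))) :
    List (List (List Int)) :=
  if _h : 0 < p ∧ p ≤ (rest.length : Int) then
    let res' := res ++ [rest.take p.toNat]
    match sh with
    | q :: sh' => altLoop (rest.drop p.toNat) sh' q res'
    | [] => altLoop (rest.drop p.toNat) [] p res'
  else res
termination_by rest.length
decreasing_by
  all_goals simp [List.length_drop]; omega
  
def mat3d_py_alt (mat2d : List (List Int)) (shape : List Int) : List (List (List Int)) :=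
  match shape with
  | [] => []  -- Python raises IndexError here; excluded by Pre_
  | p :: sh => altLoop mat2d sh p []

-- ===== PRECONDITION & SPEC =====
-- A raises IndexError iff shape is empty (shape.pop(0)); B raises there too.
def Pre_mat3d_py (mat2d : List (List Int)) (shape : List Int) : Prop := shape ≠ []
instance (mat2d : List (List Int)) (shape : List Int) : Decidable (Pre_mat3d_py mat2d shape) := by unfold Pre_mat3d_py; infer_instance
def pvWitness_mat3d_py : List (List Int) × List Int := ([[1, 2], [3, 4], [5, 6]], [1, 2])

def Spec_mat3d_py (mat2d : List (List Int)) (shape : List Int) (out : List (List (List Int))) : Prop := out = mat3d_py_alt mat2d shape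
instance (mat2d : List (List Int)) (shape : List Int) (out : List (List (List Int))) : Decidable (Spec_mat3d_py mat2d shape out) := by unfold Spec_mat3d_py; infer_instance

-- ===== CLAIM (what is proved, stated in full; the proofs are below) =====
def Claim_equal_mat3d_py : Prop := ∀ (mat2d : List (List Int)) (shape : List Int), Dom_mat3d_py mat2d shape → Pre_mat3d_py mat2d shape → Spec_mat3d_py mat2d shape (mat3d_py mat2d shape)

-- ===== LEMMAS AND PROOFS =====

-- with a non-positive block size, A's counter never fires: the fold leaves _res3d as is
theorem foldA_nonpos (l : List (List Int)) (res : List (List (List Int)))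
    (cur : List (List Int)) (sh : List Int) (p : Int) (hp : p ≤ 0) :
    (l.foldl stepA (res, cur, sh, p)).1 = res := by
  induction l generalizing cur with
  | nil => rfl
  | cons r l ih =>
    have : ((cur ++ [r]).length : Int) ≠ p := by simp; omega
    simp only [List.foldl_cons, stepA, if_neg this]
    exact ih _

-- too few rows left for a full block: the fold leaves _res3d as is
theorem foldA_short (l : List (List Int)) (res : List (List (List Int)))
    (cur : List (List Int)) (sh : List Int) (p : Int)
    (hl : (cur.length : Int) + l.length < p) :
    (l.foldl stepA (res, cur, sh, p)).1 = res := by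
  induction l generalizing cur with
  | nil => rfl
  | cons r l ih =>
    have : ((cur ++ [r]).length : Int) ≠ p := by simp at hl ⊢; omega
    simp only [List.foldl_cons, stepA, if_neg this]
    apply ih
    simp at hl ⊢; omega

-- folding A's step over exactly one full block flushes it and advances the shape
theorem foldA_chunk (c : List (List Int)) (res : List (List (List Int)))
    (cur : List (List Int)) (sh : List Int) (p : Int)
    (hne : c ≠ []) (hlen : ((cur.length : Int) + c.length) = p) :
    c.foldl stepA (res, cur, sh, p) =
      match sh with
      | q :: sh' => (res ++ [cur ++ c], [], sh', q)
      | [] => (res ++ [cur ++ c], [], [], p) := by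
  induction c generalizing cur with
  | nil => exact absurd rfl hne
  | cons r c ih =>
    by_cases hc : c = []
    · subst hc
      have hp1 : (cur.length : Int) + 1 = p := by simp at hlen; omega
      cases sh <;> simp [stepA, hp1]
    · have hne2 : ((cur ++ [r]).length : Int) ≠ p := by
        have := List.length_pos_iff.mpr hc
        simp at hlen ⊢; omega
      simp only [List.foldl_cons, stepA, if_neg hne2]
      rw [ih _ hc (by simp at hlen ⊢; omega)]
      cases sh <;> simp

theorem main_lemma (l : List (List Int)) (sh : List Int) (p : Int)
    (res : List (List (List Int))) :
    (l.foldl stepA (res, [], sh, p)).1 = altLoop l sh p res := by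
  by_cases hp : 0 < p ∧ p ≤ (l.length : Int)
  · have hlen : p.toNat ≤ l.length := by omega
    have hsplit : l = l.take p.toNat ++ l.drop p.toNat := (List.take_append_drop _ _).symm
    have hne : l.take p.toNat ≠ [] := by
      have : (l.take p.toNat).length = p.toNat := by simp; omega
      intro h; rw [h] at this; simp at this; omega
    have hclen : (((List.nil (α := List Int)).length : Int) + (l.take p.toNat).length) = p := by
      simp; omega
    rw [altLoop, dif_pos hp]
    conv_lhs => rw [hsplit]
    rw [List.foldl_append, foldA_chunk _ _ _ _ _ hne hclen]
    have hdrop : (l.drop p.toNat).length < l.length := by simp; omega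
    cases sh with
    | nil => simpa using main_lemma (l.drop p.toNat) [] p (res ++ [l.take p.toNat])
    | cons q sh' => simpa using main_lemma (l.drop p.toNat) sh' q (res ++ [l.take p.toNat])
  · rw [altLoop, dif_neg hp]
    rcases lt_or_ge 0 p with h0 | h0
    · exact foldA_short _ _ _ _ _ (by simp; omega)
    · exact foldA_nonpos _ _ _ _ _ h0
termination_by l.length
decreasing_by all_goals (simp; try omega)

-- ===== VERDICT (by name: the statement is the Claim_ definition above) =====
theorem mat3d_py_spec : Claim_equal_mat3d_py := by
  intro mat2d shape _ hpre
  unfold Spec_mat3d_py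
  cases shape with
  | nil => exact absurd rfl hpre
  | cons p rest => exact main_lemma mat2d rest p []
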